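-- pv_equiv track=rewrite | github.com/joycevandersel/joycevandersel | Algorithms-in-bioinformatics/Hidden_Markov_Model.py | transition_dictionary
-- ===== SOURCE A (Python) =====
-- def transition_dictionary(seqs, guide):
--     """ Creates a transition dictionary from a match state to the next.
--
--     :param seqs: list; protein sequence alignments.
--     :param guide: list; containing a 'M' or 'I', depending on if it is a match
--             state or not.
--     :return: dictionary; keys are the transitions types. The value is a list
--                 with a length of the number of match states + 1. Each position
--                 in the list is an integer with the number of times the type of
--                 transitions happened from the match state until the next.
--
--     This function tracks the transitions sequence by sequence. It starts in a
--     match states at position 0.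
--     """
--     names = ['MM', 'MI', 'MD', 'IM', 'II', 'ID', 'DM', 'DI', 'DD']
--     match_states = [0 for pos in range(guide.count('M') + 1)]
--     trans_dic = {}
--     for name in names:
--         trans_dic[name] = match_states.copy()
--     for item in seqs:
--         state = 'M'
--         pos = 0
--         for i in range(len(guide)):
--             if guide[i] == 'M':
--                 if item[i] != "-":
--                     trans_dic[state + 'M'][pos] += 1
--                     state = 'M'
--                     pos += 1
--                 else:
--                     trans_dic[state + 'D'][pos] += 1
--                     state = 'D'
--                     pos += 1
--             else:
--                 if item[i] != '-':
--                     trans_dic[state + 'I'][pos] += 1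
--                     state = 'I'
--         trans_dic[state + 'M'][-1] += 1
--     return trans_dic
-- ===== SOURCE B (Python) =====
-- def transition_dictionary(seqs, guide):
--     """Two-phase re-implementation: build each sequence's (state, position)
--     trajectory first, then count transitions from adjacent trajectory pairs."""
--     names = ['MM', 'MI', 'MD', 'IM', 'II', 'ID', 'DM', 'DI', 'DD']
--     n = guide.count('M') + 1
--     trans_dic = {name: [0] * n for name in names}
--     for item in seqs:
--         path = [('M', 0)]
--         pos = 0
--         for i in range(len(guide)):
--             if guide[i] == 'M':
--                 path.append(('M' if item[i] != '-' else 'D', pos + 1))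
--                 pos += 1
--             elif item[i] != '-':
--                 path.append(('I', pos))
--         path.append(('M', pos))
--         for (s1, p1), (s2, p2) in zip(path, path[1:]):
--             trans_dic[s1 + s2][p1] += 1
--     return trans_dic
-- ===== Notes on version B (the rewrite author's own statement) =====
-- stated objective: alternative
-- what changed: A updates the transition counters inline while walking each sequence with a running (state, pos) state machine; B first builds each sequence's explicit (state, position) trajectory list and then counts transitions by folding over adjacent trajectory pairs, replacing A's inline [-1] terminal update by the final trajectory pair.
import Mathlib
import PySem

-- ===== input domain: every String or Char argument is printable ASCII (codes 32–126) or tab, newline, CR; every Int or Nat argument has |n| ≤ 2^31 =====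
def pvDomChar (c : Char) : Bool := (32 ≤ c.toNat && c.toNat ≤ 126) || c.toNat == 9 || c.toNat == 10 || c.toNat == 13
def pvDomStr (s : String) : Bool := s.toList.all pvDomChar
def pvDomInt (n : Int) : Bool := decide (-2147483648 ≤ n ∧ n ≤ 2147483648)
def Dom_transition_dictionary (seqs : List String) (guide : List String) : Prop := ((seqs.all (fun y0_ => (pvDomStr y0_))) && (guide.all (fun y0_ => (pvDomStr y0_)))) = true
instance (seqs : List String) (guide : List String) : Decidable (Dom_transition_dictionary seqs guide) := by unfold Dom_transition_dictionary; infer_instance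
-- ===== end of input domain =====

-- B replaces A's inline state-machine update with a two-phase decomposition:
-- build each sequence's (state, position) trajectory, then count adjacent pairs.

-- shared transliteration of Python's `trans_dic[key][i] += 1`
-- (in-place increment of one element of the list stored under `key`)
def pvDictInc (d : PySem.Dict String (List Int)) (key : String) (i : Int) :
    PySem.Dict String (List Int) :=
  d.modify key [] (fun l => PySem.List.pySetD l i (PySem.List.pyGetD l i 0 + 1))

-- ===== PORT A =====
def transition_dictionary (seqs : List String) (guide : List String) : List (String × List Int) :=
  let names : List String := ["MM", "MI", "MD", "IM", "II", "ID", "DM", "DI", "DD"]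
  let match_states : List Int := (List.range (PySem.List.count guide "M" + 1)).map (fun _ => 0)
  let trans_dic : PySem.Dict String (List Int) :=
    names.foldl (fun d name => d.insert name match_states) PySem.Dict.empty
  let final := seqs.foldl (fun d item =>
      let r := (PySem.List.pyRange 0 guide.length 1).foldl
        (fun (acc : PySem.Dict String (List Int) × String × Int) i =>
          if PySem.List.pyGetD guide i "" = "M" then
            if PySem.Str.pyGet? item i ≠ some '-' then
              (pvDictInc acc.1 (acc.2.1 ++ "M") acc.2.2, "M", acc.2.2 + 1)
            else
              (pvDictInc acc.1 (acc.2.1 ++ "D") acc.2.2, "D", acc.2.2 + 1)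
          else
            if PySem.Str.pyGet? item i ≠ some '-' then
              (pvDictInc acc.1 (acc.2.1 ++ "I") acc.2.2, "I", acc.2.2)
            else acc)
        (d, "M", 0)
      pvDictInc r.1 (r.2.1 ++ "M") (-1))
    trans_dic
  final.items

-- ===== PORT B =====
def transition_dictionary_alt (seqs : List String) (guide : List String) : List (String × List Int) :=
  let names : List String := ["MM", "MI", "MD", "IM", "II", "ID", "DM", "DI", "DD"]
  let n : Nat := PySem.List.count guide "M" + 1
  let trans_dic : PySem.Dict String (List Int) :=
    PySem.Dict.ofList (names.map (fun name => (name, (List.range n).map (fun _ => (0 : Int)))))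
  let final := seqs.foldl (fun d item =>
      -- phase 1: trajectory of (state, position) events
      let pp := (PySem.List.pyRange 0 guide.length 1).foldl
        (fun (acc : List (String × Int) × Int) i =>
          if PySem.List.pyGetD guide i "" = "M" then
            (acc.1 ++ [((if PySem.Str.pyGet? item i ≠ some '-' then "M" else "D"), acc.2 + 1)], acc.2 + 1)
          else if PySem.Str.pyGet? item i ≠ some '-' then
            (acc.1 ++ [("I", acc.2)], acc.2)
          else acc)
        ([("M", 0)], 0)
      let path := pp.1 ++ [("M", pp.2)]
      -- phase 2: count transitions from adjacent trajectory pairs (zip(path, path[1:]))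
      (path.zip (PySem.List.slice path (some 1) none)).foldl
        (fun d pr => pvDictInc d (pr.1.1 ++ pr.2.1) pr.1.2) d)
    trans_dic
  final.items

-- ===== PRECONDITION & SPEC =====
-- A indexes item[i] for every i < len(guide): a sequence shorter than the guide raises IndexError.
def Pre_transition_dictionary (seqs : List String) (guide : List String) : Prop :=
  ∀ s ∈ seqs, guide.length ≤ s.toList.length
instance (seqs : List String) (guide : List String) : Decidable (Pre_transition_dictionary seqs guide) := by unfold Pre_transition_dictionary; infer_instance

def pvWitness_transition_dictionary : List String × List String :=
  (["AC-", "-CG"], ["M", "I", "M"])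

def Spec_transition_dictionary (seqs : List String) (guide : List String) (out : List (String × List Int)) : Prop := out = transition_dictionary_alt seqs guide
instance (seqs : List String) (guide : List String) (out : List (String × List Int)) : Decidable (Spec_transition_dictionary seqs guide out) := by unfold Spec_transition_dictionary; infer_instance

-- ===== CLAIM (what is proved, stated in full; the proofs are below) =====
def Claim_equal_transition_dictionary : Prop := ∀ (seqs : List String) (guide : List String), Dom_transition_dictionary seqs guide → Pre_transition_dictionary seqs guide → Spec_transition_dictionary seqs guide (transition_dictionary seqs guide)

-- ===== LEMMAS AND PROOFS =====

-- generic: an index loop over two parallel lists is a fold over their zip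
theorem pvRangeZip {γ : Type} (gs : List String) (cs : List Char) (h : gs.length ≤ cs.length)
    (f : γ → String → Option Char → γ) (k : Nat) (init : γ) :
    (PySem.List.pyRange k gs.length 1).foldl
        (fun acc i => f acc (PySem.List.pyGetD gs i "") (PySem.List.pyGet? cs i)) init
      = ((gs.drop k).zip (cs.drop k)).foldl (fun acc p => f acc p.1 (some p.2)) init := by
  by_cases hk : gs.length ≤ k
  · rw [PySem.List.pyRange_one_eq_nil (by exact_mod_cast hk), List.drop_eq_nil_of_le hk]
    simp
  · push Not at hk
    rw [PySem.List.pyRange_one_cons (by exact_mod_cast hk)]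
    rw [List.drop_eq_getElem_cons hk, List.drop_eq_getElem_cons (lt_of_lt_of_le hk h)]
    simp only [List.foldl_cons, List.zip_cons_cons]
    have h1 : PySem.List.pyGetD gs (k : Int) "" = gs[k] := by
      rw [PySem.List.pyGetD_natCast]; exact List.getD_eq_getElem gs "" hk
    have h2 : PySem.List.pyGet? cs (k : Int) = some cs[k] := by
      rw [PySem.List.pyGet?_natCast]
      exact List.getElem?_eq_getElem (lt_of_lt_of_le hk h)
    rw [h1, h2]
    have := pvRangeZip gs cs h f (k + 1) (f init gs[k] (some cs[k]))
    have hcast : ((k : Int) + 1) = ((k + 1 : Nat) : Int) := by push_cast; ring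
    rw [hcast]
    exact this
termination_by gs.length - k

def pvNames : List String := ["MM", "MI", "MD", "IM", "II", "ID", "DM", "DI", "DD"]

def pvGo : List (String × Char) → Int → List (String × Int)
  | [], pos => [("M", pos)]
  | (g, c) :: t, pos =>
    if g = "M" then
      ((if c ≠ '-' then "M" else "D"), pos + 1) :: pvGo t (pos + 1)
    else if c ≠ '-' then ("I", pos) :: pvGo t pos
    else pvGo t pos

def pvStepA : List (String × Char) → PySem.Dict String (List Int) × String × Int → PySem.Dict String (List Int)
  | [], acc => pvDictInc acc.1 (acc.2.1 ++ "M") (-1)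
  | (g, c) :: t, acc =>
    if g = "M" then
      if c ≠ '-' then pvStepA t (pvDictInc acc.1 (acc.2.1 ++ "M") acc.2.2, "M", acc.2.2 + 1)
      else pvStepA t (pvDictInc acc.1 (acc.2.1 ++ "D") acc.2.2, "D", acc.2.2 + 1)
    else if c ≠ '-' then pvStepA t (pvDictInc acc.1 (acc.2.1 ++ "I") acc.2.2, "I", acc.2.2)
    else pvStepA t acc

def pvPairs : List (String × Int) → PySem.Dict String (List Int) → PySem.Dict String (List Int)
  | x :: y :: rest, d => pvPairs (y :: rest) (pvDictInc d (x.1 ++ y.1) x.2)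
  | _, d => d

-- number of match columns
def pvCM (cols : List (String × Char)) : Nat := cols.countP (fun p => p.1 == "M")

theorem pvCM_cons (g : String) (c : Char) (t : List (String × Char)) :
    pvCM ((g, c) :: t) = (if g = "M" then 1 else 0) + pvCM t := by
  unfold pvCM; rw [List.countP_cons]; by_cases h : g = "M" <;> simp [h] <;> omega

-- increments keep every stored list's length
theorem pvDictInc_len_inv (d : PySem.Dict String (List Int)) (key : String) (i : Int) (n : Nat)
    (H : ∀ k ∈ pvNames, (d.getD k []).length = n) :
    ∀ k ∈ pvNames, ((pvDictInc d key i).getD k []).length = n := by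
  intro k hk
  unfold pvDictInc
  rw [PySem.Dict.getD_modify]
  split_ifs with hh
  · subst hh; rw [PySem.List.length_pySetD]; exact H k hk
  · exact H k hk

-- a `[-1]` increment on a list of length pos+1 is the increment at pos
theorem pvDictInc_neg_one (d : PySem.Dict String (List Int)) (key : String) (n : Nat) (pos : Int)
    (hlen : (d.getD key []).length = n) (hpos : 0 ≤ pos) (hn : pos + 1 = (n : Int)) :
    pvDictInc d key (-1) = pvDictInc d key pos := by
  unfold pvDictInc
  have hne : (d.getD key []) ≠ [] := by
    intro h0; rw [h0] at hlen; simp at hlen; omega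
  have hidx : PySem.List.pyIdx? (d.getD key []).length (-1)
      = PySem.List.pyIdx? (d.getD key []).length pos := by
    simp only [PySem.List.pyIdx?, hlen]
    have h2 : -(n:Int) ≤ -1 := by omega
    have h3 : pos < (n:Int) := by omega
    simp [h2, hpos, h3]
    omega
  have hget : PySem.List.pyGetD (d.getD key []) (-1) 0
      = PySem.List.pyGetD (d.getD key []) pos 0 := by
    simp only [PySem.List.pyGetD, PySem.List.pyGet?, hidx]
  have hset : ∀ v, PySem.List.pySetD (d.getD key []) (-1) v
      = PySem.List.pySetD (d.getD key []) pos v := by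
    intro v
    simp only [PySem.List.pySetD, PySem.List.pySet?, hidx]
  simp only [PySem.Dict.modify]
  rw [hget, hset]

-- named loop bodies over a single column (g = guide entry, oc = the residue, as Python reads them)
def pvFA (acc : PySem.Dict String (List Int) × String × Int) (g : String) (oc : Option Char) :
    PySem.Dict String (List Int) × String × Int :=
  if g = "M" then
    if oc ≠ some '-' then (pvDictInc acc.1 (acc.2.1 ++ "M") acc.2.2, "M", acc.2.2 + 1)
    else (pvDictInc acc.1 (acc.2.1 ++ "D") acc.2.2, "D", acc.2.2 + 1)
  else if oc ≠ some '-' then (pvDictInc acc.1 (acc.2.1 ++ "I") acc.2.2, "I", acc.2.2)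
  else acc

def pvFB (acc : List (String × Int) × Int) (g : String) (oc : Option Char) :
    List (String × Int) × Int :=
  if g = "M" then
    (acc.1 ++ [((if oc ≠ some '-' then "M" else "D"), acc.2 + 1)], acc.2 + 1)
  else if oc ≠ some '-' then (acc.1 ++ [("I", acc.2)], acc.2)
  else acc

theorem pvFoldA (cols : List (String × Char)) :
    ∀ acc : PySem.Dict String (List Int) × String × Int,
    pvDictInc (cols.foldl (fun a p => pvFA a p.1 (some p.2)) acc).1
        ((cols.foldl (fun a p => pvFA a p.1 (some p.2)) acc).2.1 ++ "M") (-1)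
      = pvStepA cols acc := by
  induction cols with
  | nil => intro acc; rfl
  | cons p t ih =>
    intro acc
    obtain ⟨g, c⟩ := p
    have hstep : pvStepA ((g, c) :: t) acc = pvStepA t (pvFA acc g (some c)) := by
      by_cases hg : g = "M" <;> by_cases hc : c = '-' <;> simp [pvStepA, pvFA, hg, hc]
    rw [List.foldl_cons, hstep]
    exact ih _

theorem pvFoldB (cols : List (String × Char)) :
    ∀ (p0 : List (String × Int)) (pos : Int),
    (cols.foldl (fun a p => pvFB a p.1 (some p.2)) (p0, pos)).1
        ++ [("M", (cols.foldl (fun a p => pvFB a p.1 (some p.2)) (p0, pos)).2)]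
      = p0 ++ pvGo cols pos := by
  induction cols with
  | nil => intro p0 pos; simp [pvGo]
  | cons p t ih =>
    intro p0 pos
    obtain ⟨g, c⟩ := p
    rw [List.foldl_cons]
    have h2 := ih (pvFB (p0, pos) g (some c)).1 (pvFB (p0, pos) g (some c)).2
    rw [Prod.mk.eta] at h2
    rw [h2]
    by_cases hg : g = "M" <;> by_cases hc : c = '-' <;>
      simp [pvFB, pvGo, hg, hc]

theorem pvZipTail (path : List (String × Int)) :
    ∀ d : PySem.Dict String (List Int),
    (path.zip path.tail).foldl (fun d pr => pvDictInc d (pr.1.1 ++ pr.2.1) pr.1.2) d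
      = pvPairs path d := by
  induction path with
  | nil => intro d; simp [pvPairs]
  | cons x rest ih =>
    intro d
    cases rest with
    | nil => simp [pvPairs]
    | cons y r =>
      simp only [List.tail_cons, List.zip_cons_cons, List.foldl_cons]
      have : (y :: r).zip r = (y :: r).zip (y :: r).tail := by simp
      rw [this, ih]
      rfl

theorem pvStepA_inv (cols : List (String × Char)) (n : Nat) :
    ∀ acc : PySem.Dict String (List Int) × String × Int,
    (∀ k ∈ pvNames, (acc.1.getD k []).length = n) →
    ∀ k ∈ pvNames, ((pvStepA cols acc).getD k []).length = n := by
  induction cols with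
  | nil => intro acc H; exact pvDictInc_len_inv acc.1 _ _ n H
  | cons p t ih =>
    intro acc H
    obtain ⟨g, c⟩ := p
    have hstep : pvStepA ((g, c) :: t) acc = pvStepA t (pvFA acc g (some c)) := by
      by_cases hg : g = "M" <;> by_cases hc : c = '-' <;> simp [pvStepA, pvFA, hg, hc]
    rw [hstep]
    apply ih
    by_cases hg : g = "M" <;> by_cases hc : c = '-' <;>
      simp only [pvFA, hg, hc, ne_eq, Option.some.injEq, not_true_eq_false,
        not_false_eq_true, if_true, if_false] <;>
      first
        | exact H
        | exact pvDictInc_len_inv acc.1 _ _ n H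

theorem pvMain (cols : List (String × Char)) :
    ∀ (d : PySem.Dict String (List Int)) (st : String) (pos : Int) (n : Nat),
    st ∈ (["M", "I", "D"] : List String) →
    0 ≤ pos →
    pos + (pvCM cols : Int) + 1 = (n : Int) →
    (∀ k ∈ pvNames, (d.getD k []).length = n) →
    pvStepA cols (d, st, pos) = pvPairs ((st, pos) :: pvGo cols pos) d := by
  induction cols with
  | nil =>
    intro d st pos n hst hpos hn H
    have hkey : st ++ "M" ∈ pvNames := by fin_cases hst <;> decide
    have hn' : pos + 1 = (n : Int) := by
      have h0 : pvCM ([] : List (String × Char)) = 0 := rfl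
      rw [h0] at hn; push_cast at hn; omega
    simp only [pvStepA, pvGo, pvPairs]
    exact pvDictInc_neg_one d (st ++ "M") n pos (H _ hkey) hpos hn'
  | cons p t ih =>
    intro d st pos n hst hpos hn H
    obtain ⟨g, c⟩ := p
    have hcm := pvCM_cons g c t
    have hstep : pvStepA ((g, c) :: t) (d, st, pos) = pvStepA t (pvFA (d, st, pos) g (some c)) := by
      by_cases hg : g = "M" <;> by_cases hc : c = '-' <;> simp [pvStepA, pvFA, hg, hc]
    rw [hstep]
    by_cases hg : g = "M" <;> by_cases hc : c = '-'
    · -- M column, gap: D transition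
      have e : pvFA (d, st, pos) g (some c) = (pvDictInc d (st ++ "D") pos, "D", pos + 1) := by
        simp [pvFA, hg, hc]
      rw [e, ih (pvDictInc d (st ++ "D") pos) "D" (pos + 1) n (by decide) (by omega)
            (by rw [hcm] at hn; simp only [hg, if_true] at hn; push_cast at hn ⊢; omega)
            (pvDictInc_len_inv d _ _ n H)]
      simp [pvGo, pvPairs, hg, hc]
    · -- M column, residue: M transition
      have e : pvFA (d, st, pos) g (some c) = (pvDictInc d (st ++ "M") pos, "M", pos + 1) := by
        simp [pvFA, hg, hc]
      rw [e, ih (pvDictInc d (st ++ "M") pos) "M" (pos + 1) n (by decide) (by omega)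
            (by rw [hcm] at hn; simp only [hg, if_true] at hn; push_cast at hn ⊢; omega)
            (pvDictInc_len_inv d _ _ n H)]
      simp [pvGo, pvPairs, hg, hc]
    · -- I column, gap: nothing happens
      have e : pvFA (d, st, pos) g (some c) = (d, st, pos) := by simp [pvFA, hg, hc]
      rw [e, ih d st pos n hst hpos
            (by rw [hcm] at hn; simp only [hg, if_false] at hn; push_cast at hn ⊢; omega) H]
      simp [pvGo, hg, hc]
    · -- I column, residue: I transition
      have e : pvFA (d, st, pos) g (some c) = (pvDictInc d (st ++ "I") pos, "I", pos) := by
        simp [pvFA, hg, hc]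
      rw [e, ih (pvDictInc d (st ++ "I") pos) "I" pos n (by decide) hpos
            (by rw [hcm] at hn; simp only [hg, if_false] at hn; push_cast at hn ⊢; omega)
            (pvDictInc_len_inv d _ _ n H)]
      simp [pvGo, pvPairs, hg, hc]

theorem pvCM_zip (gs : List String) : ∀ cs : List Char, gs.length ≤ cs.length →
    pvCM (gs.zip cs) = PySem.List.count gs "M" := by
  induction gs with
  | nil => intro cs h; rfl
  | cons g gt ih =>
    intro cs h
    cases cs with
    | nil => simp at h
    | cons c ct =>
      simp only [List.zip_cons_cons]
      rw [pvCM_cons, ih ct (by simpa using h)]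
      simp only [PySem.List.count, List.count_cons]
      by_cases hg : g = "M" <;> simp [hg] <;> omega

def pvMS (n : Nat) : List Int := (List.range n).map (fun _ => 0)

def pvInit (n : Nat) : PySem.Dict String (List Int) :=
  pvNames.foldl (fun d name => d.insert name (pvMS n)) PySem.Dict.empty

theorem pvInit_items (n : Nat) :
    (pvInit n).items = pvNames.map (fun nm => (nm, pvMS n)) := by
  have := PySem.Dict.items_foldl_insert_fresh pvNames (fun a => a) (fun _ => pvMS n)
      PySem.Dict.empty (by intro a _; simp) (by decide)
  simpa [pvInit] using this

theorem pvInit_nodupKeys (n : Nat) : (pvInit n).keys.Nodup := by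
  have := PySem.Dict.nodup_keys_foldl_insert pvNames (fun _ _ => pvMS n)
      PySem.Dict.empty PySem.Dict.nodup_keys_empty
  simpa [pvInit] using this

theorem pvInit_getD (n : Nat) (k : String) (hk : k ∈ pvNames) :
    (pvInit n).getD k [] = pvMS n := by
  exact PySem.Dict.getD_of_mem_items _
    (by rw [pvInit_items]; exact List.mem_map.mpr ⟨k, hk, rfl⟩) (pvInit_nodupKeys n) []

theorem pvInit_inv (n : Nat) : ∀ k ∈ pvNames, ((pvInit n).getD k []).length = n := by
  intro k hk; rw [pvInit_getD n k hk]; simp [pvMS]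

theorem pvInit_eq (n : Nat) :
    PySem.Dict.ofList (pvNames.map (fun nm => (nm, pvMS n))) = pvInit n := by
  simp [PySem.Dict.ofList, PySem.Dict.update, pvInit, List.foldl_map]

def pvBodyA (guide : List String) (d : PySem.Dict String (List Int)) (item : String) :
    PySem.Dict String (List Int) :=
  let r := (PySem.List.pyRange 0 guide.length 1).foldl
    (fun (acc : PySem.Dict String (List Int) × String × Int) i =>
      if PySem.List.pyGetD guide i "" = "M" then
        if PySem.Str.pyGet? item i ≠ some '-' then
          (pvDictInc acc.1 (acc.2.1 ++ "M") acc.2.2, "M", acc.2.2 + 1)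
        else
          (pvDictInc acc.1 (acc.2.1 ++ "D") acc.2.2, "D", acc.2.2 + 1)
      else
        if PySem.Str.pyGet? item i ≠ some '-' then
          (pvDictInc acc.1 (acc.2.1 ++ "I") acc.2.2, "I", acc.2.2)
        else acc)
    (d, "M", 0)
  pvDictInc r.1 (r.2.1 ++ "M") (-1)

def pvBodyB (guide : List String) (d : PySem.Dict String (List Int)) (item : String) :
    PySem.Dict String (List Int) :=
  let pp := (PySem.List.pyRange 0 guide.length 1).foldl
    (fun (acc : List (String × Int) × Int) i =>
      if PySem.List.pyGetD guide i "" = "M" then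
        (acc.1 ++ [((if PySem.Str.pyGet? item i ≠ some '-' then "M" else "D"), acc.2 + 1)], acc.2 + 1)
      else if PySem.Str.pyGet? item i ≠ some '-' then
        (acc.1 ++ [("I", acc.2)], acc.2)
      else acc)
    ([("M", 0)], 0)
  let path := pp.1 ++ [("M", pp.2)]
  (path.zip (PySem.List.slice path (some 1) none)).foldl
    (fun d pr => pvDictInc d (pr.1.1 ++ pr.2.1) pr.1.2) d

theorem pvBodyA_stepA (guide : List String) (d : PySem.Dict String (List Int)) (item : String)
    (hlen : guide.length ≤ item.toList.length) :
    pvBodyA guide d item = pvStepA (guide.zip item.toList) (d, "M", 0) := by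
  have eA : pvBodyA guide d item
      = pvDictInc ((PySem.List.pyRange 0 guide.length 1).foldl
            (fun acc i => pvFA acc (PySem.List.pyGetD guide i "") (PySem.List.pyGet? item.toList i))
            (d, "M", 0)).1
          (((PySem.List.pyRange 0 guide.length 1).foldl
            (fun acc i => pvFA acc (PySem.List.pyGetD guide i "") (PySem.List.pyGet? item.toList i))
            (d, "M", 0)).2.1 ++ "M") (-1) := rfl
  have hA0 := pvRangeZip guide item.toList hlen pvFA 0 (d, "M", (0 : Int))
  simp only [Nat.cast_zero, List.drop_zero] at hA0
  rw [eA, hA0, pvFoldA]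

def pvPB (pp : List (String × Int) × Int) (d : PySem.Dict String (List Int)) :
    PySem.Dict String (List Int) :=
  let path := pp.1 ++ [("M", pp.2)]
  (path.zip (PySem.List.slice path (some 1) none)).foldl
    (fun d pr => pvDictInc d (pr.1.1 ++ pr.2.1) pr.1.2) d

theorem pvBodyB_pairs (guide : List String) (d : PySem.Dict String (List Int)) (item : String)
    (hlen : guide.length ≤ item.toList.length) :
    pvBodyB guide d item = pvPairs (("M", (0 : Int)) :: pvGo (guide.zip item.toList) 0) d := by
  have eB : pvBodyB guide d item
      = pvPB ((PySem.List.pyRange 0 guide.length 1).foldl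
          (fun acc i => pvFB acc (PySem.List.pyGetD guide i "") (PySem.List.pyGet? item.toList i))
          ([("M", 0)], 0)) d := rfl
  have hB0 := pvRangeZip guide item.toList hlen pvFB 0 ([("M", (0 : Int))], (0 : Int))
  simp only [Nat.cast_zero, List.drop_zero] at hB0
  rw [eB, hB0]
  show pvPB _ d = _
  simp only [pvPB]
  rw [PySem.List.slice_from_one, pvZipTail]
  rw [pvFoldB (guide.zip item.toList) [("M", 0)] 0]
  rfl

theorem pvBody_eq (guide : List String) (n : Nat) (hn : (n : Int) = PySem.List.count guide "M" + 1)
    (d : PySem.Dict String (List Int)) (H : ∀ k ∈ pvNames, (d.getD k []).length = n)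
    (item : String) (hlen : guide.length ≤ item.toList.length) :
    pvBodyA guide d item = pvBodyB guide d item := by
  rw [pvBodyA_stepA guide d item hlen, pvBodyB_pairs guide d item hlen]
  exact pvMain (guide.zip item.toList) d "M" 0 n (by decide) (by norm_num)
    (by rw [pvCM_zip guide item.toList hlen]; omega) H

theorem pvOuter (guide : List String) (n : Nat)
    (hn : (n : Int) = PySem.List.count guide "M" + 1) :
    ∀ (seqs : List String) (d : PySem.Dict String (List Int)),
    (∀ k ∈ pvNames, (d.getD k []).length = n) →
    (∀ s ∈ seqs, guide.length ≤ s.toList.length) →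
    seqs.foldl (pvBodyA guide) d = seqs.foldl (pvBodyB guide) d := by
  intro seqs
  induction seqs with
  | nil => intro d _ _; rfl
  | cons s st ih =>
    intro d H hs
    simp only [List.foldl_cons]
    rw [← pvBody_eq guide n hn d H s (hs s (by simp))]
    apply ih
    · rw [pvBodyA_stepA guide d s (hs s (by simp))]
      exact pvStepA_inv _ n (d, "M", 0) H
    · intro x hx; exact hs x (by simp [hx])

-- ===== VERDICT (by name: the statement is the Claim_ definition above) =====
theorem transition_dictionary_spec : Claim_equal_transition_dictionary := by
  intro seqs guide _dom pre
  unfold Spec_transition_dictionary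
  have hA : transition_dictionary seqs guide
      = (seqs.foldl (pvBodyA guide) (pvInit (PySem.List.count guide "M" + 1))).items := rfl
  have hB : transition_dictionary_alt seqs guide
      = (seqs.foldl (pvBodyB guide)
          (PySem.Dict.ofList (pvNames.map (fun nm => (nm, pvMS (PySem.List.count guide "M" + 1)))))).items := rfl
  rw [hA, hB, pvInit_eq]
  exact congrArg PySem.Dict.items
    (pvOuter guide (PySem.List.count guide "M" + 1) (by push_cast; ring) seqs
      (pvInit _) (pvInit_inv _) pre)
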